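-- pv_equiv track=rewrite | github.com/JoaoPSFranca/BCC-Topicos-de-Programacao | desafio/main.py | pegar_linha_coluna
-- ===== SOURCE A (Python) =====
-- def pegar_linha_coluna(num, dados):
--     count = 0
--     i = 0
--     j = 0
--     for x in dados:
--         count += 1
--         y = x.split()
--         if num in y:
--             i = count
--             j = y.index(num) + 1
--
--     if j < 10:
--         j = "0" + str(j)
--     else:
--         str(j)
--
--     return str(i) + j
-- ===== SOURCE B (Python) =====
-- def pegar_linha_coluna(num, dados):
--     linhas = list(dados)
--     for idx in range(len(linhas) - 1, -1, -1):
--         tokens = linhas[idx].split()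
--         if num in tokens:
--             return str(idx + 1) + str(tokens.index(num) + 1).zfill(2)
--     return "000"
-- ===== Notes on version B (the rewrite author's own statement) =====
-- stated objective: simpler
-- what changed: B scans the lines in reverse and returns at the first match (the overall last match) instead of scanning every line while overwriting accumulators, and formats the column with str(j).zfill(2).
import Mathlib
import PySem

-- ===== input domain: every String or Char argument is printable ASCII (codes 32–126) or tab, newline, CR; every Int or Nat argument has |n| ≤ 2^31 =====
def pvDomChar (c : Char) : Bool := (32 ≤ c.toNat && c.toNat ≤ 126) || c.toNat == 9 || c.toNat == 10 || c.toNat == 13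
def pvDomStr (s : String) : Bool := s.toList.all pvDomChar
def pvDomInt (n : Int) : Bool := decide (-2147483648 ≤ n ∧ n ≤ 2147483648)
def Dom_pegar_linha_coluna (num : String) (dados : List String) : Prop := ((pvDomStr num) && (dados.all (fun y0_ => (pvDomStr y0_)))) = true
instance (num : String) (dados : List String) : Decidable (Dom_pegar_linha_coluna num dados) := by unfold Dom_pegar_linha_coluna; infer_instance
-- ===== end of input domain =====

-- B scans the lines in reverse and returns at the FIRST match (the overall last match),
-- zero-padding the column with zfill, instead of A's full scan with overwritten accumulators.


-- ===== PORT A =====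
-- one step of A's for-loop; state = (count, i, j)
def pvStepA (num : String) (s : Int × Int × Int) (x : String) : Int × Int × Int :=
  let count := s.1 + 1
  let y := PySem.Str.split₀ x
  match PySem.List.index? y num with      -- 'if num in y' together with 'y.index(num)'
  | some t => (count, count, (t : Int) + 1)
  | none => (count, s.2.1, s.2.2)

def pegar_linha_coluna (num : String) (dados : List String) : String :=
  let st := dados.foldl (pvStepA num) (0, 0, 0)
  let i := st.2.1
  let j := st.2.2
  if j < 10 then PySem.Int.toStr i ++ ("0" ++ PySem.Int.toStr j)
  else ""   -- here Python raises TypeError (str + int); Pre_ excludes these inputs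

-- ===== PORT B =====
-- B's reverse loop: first match walking indices k-1, k-2, …, 0
def pvAltScan (num : String) (linhas : List String) : Nat → Option (Nat × Nat)
  | 0 => none
  | k + 1 =>
    let tokens := PySem.Str.split₀ (linhas.getD k "")
    match PySem.List.index? tokens num with
    | some t => some (k, t)
    | none => pvAltScan num linhas k

-- str(n).zfill(2); exact for n ≥ 1 (no sign handling needed, B only pads positive ints)
def pvZfill2 (s : String) : String := if PySem.Str.len s < 2 then "0" ++ s else s

def pegar_linha_coluna_alt (num : String) (dados : List String) : String :=
  match pvAltScan num dados dados.length with
  | some (k, t) => PySem.Int.toStr ((k : Int) + 1) ++ pvZfill2 (PySem.Int.toStr ((t : Int) + 1))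
  | none => "000"

-- ===== PRECONDITION & SPEC =====
-- Pre_ excludes exactly the inputs where A raises TypeError: the last line containing num as a
-- token has num at 0-based token index ≥ 9 (column ≥ 10), so A's 'else: str(j)' leaves j an int.
def Pre_pegar_linha_coluna (num : String) (dados : List String) : Prop :=
  ((dados.reverse.find? (fun x => (PySem.List.index? (PySem.Str.split₀ x) num).isSome)).all
    (fun x => (PySem.List.index? (PySem.Str.split₀ x) num).getD 0 < 9)) = true
instance (num : String) (dados : List String) : Decidable (Pre_pegar_linha_coluna num dados) := by
  unfold Pre_pegar_linha_coluna; infer_instance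

def pvWitness_pegar_linha_coluna : String × List String := ("7", ["a b", "x 7 y"])

def Spec_pegar_linha_coluna (num : String) (dados : List String) (out : String) : Prop := out = pegar_linha_coluna_alt num dados
instance (num : String) (dados : List String) (out : String) : Decidable (Spec_pegar_linha_coluna num dados out) := by unfold Spec_pegar_linha_coluna; infer_instance

-- ===== CLAIM (what is proved, stated in full; the proofs are below) =====
def Claim_equal_pegar_linha_coluna : Prop := ∀ (num : String) (dados : List String), Dom_pegar_linha_coluna num dados → Pre_pegar_linha_coluna num dados → Spec_pegar_linha_coluna num dados (pegar_linha_coluna num dados)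

-- ===== LEMMAS AND PROOFS =====

-- the last matching line, as (0-based line index, 0-based token index), defined front-to-back
def pvLastHit (num : String) : List String → Option (Nat × Nat)
  | [] => none
  | x :: rest =>
    match pvLastHit num rest with
    | some (k, t) => some (k + 1, t)
    | none =>
      match PySem.List.index? (PySem.Str.split₀ x) num with
      | some t => some (0, t)
      | none => none

theorem pvLastHit_concat (num x : String) (ys : List String) :
    pvLastHit num (ys ++ [x]) =
      match PySem.List.index? (PySem.Str.split₀ x) num with
      | some t => some (ys.length, t)
      | none => pvLastHit num ys := by
  induction ys with
  | nil =>
    simp only [List.nil_append, pvLastHit, List.length_nil]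
  | cons y ys ih =>
    simp only [List.cons_append, pvLastHit, ih, List.length_cons]
    cases PySem.List.index? (PySem.Str.split₀ x) num with
    | some t => rfl
    | none => cases pvLastHit num ys <;> rfl

theorem pvFoldA (num : String) (xs : List String) :
    ∀ (c i j : Int), xs.foldl (pvStepA num) (c, i, j) =
      match pvLastHit num xs with
      | none => (c + xs.length, i, j)
      | some (k, t) => (c + xs.length, c + (k : Int) + 1, (t : Int) + 1) := by
  induction xs with
  | nil => intro c i j; simp [pvLastHit]
  | cons x rest ih =>
    intro c i j
    simp only [List.foldl_cons, pvStepA, pvLastHit]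
    cases hx : PySem.List.index? (PySem.Str.split₀ x) num with
    | some t =>
      simp only [ih]
      cases h : pvLastHit num rest with
      | none =>
        simp only [List.length_cons, Prod.mk.injEq, and_true]
        try omega
      | some kt =>
        obtain ⟨k, t'⟩ := kt
        simp only [List.length_cons, Prod.mk.injEq, and_true]
        try omega
    | none =>
      simp only [ih]
      cases h : pvLastHit num rest with
      | none =>
        simp only [List.length_cons, Prod.mk.injEq, and_true]
        try omega
      | some kt =>
        obtain ⟨k, t'⟩ := kt
        simp only [List.length_cons, Prod.mk.injEq, and_true]
        try omega

theorem pvAltScan_prefix (num x : String) (ys : List String) :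
    ∀ k, k ≤ ys.length → pvAltScan num (ys ++ [x]) k = pvAltScan num ys k := by
  intro k
  induction k with
  | zero => intro _; rfl
  | succ k ih =>
    intro hk
    have hlt : k < ys.length := by omega
    simp only [pvAltScan, List.getD_append _ _ _ _ hlt, ih (by omega)]

theorem pvAltScan_eq_lastHit (num : String) (xs : List String) :
    pvAltScan num xs xs.length = pvLastHit num xs := by
  induction xs using List.reverseRecOn with
  | nil => rfl
  | append_singleton ys x ih =>
    rw [pvLastHit_concat]
    have hlen : (ys ++ [x]).length = ys.length + 1 := by simp
    rw [hlen]
    simp only [pvAltScan]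
    have hget : (ys ++ [x]).getD ys.length "" = x := by
      simp [List.getD]
    rw [hget]
    cases PySem.List.index? (PySem.Str.split₀ x) num with
    | some t => rfl
    | none => rw [pvAltScan_prefix num x ys ys.length (le_refl _), ih]

-- the last matching line found by reverse-find? carries the same token index t as pvLastHit
theorem pvFind_lastHit (num : String) (xs : List String) :
    (match pvLastHit num xs with
      | none => xs.reverse.find? (fun x => (PySem.List.index? (PySem.Str.split₀ x) num).isSome) = none
      | some (_, t) => ∃ x, xs.reverse.find? (fun x => (PySem.List.index? (PySem.Str.split₀ x) num).isSome) = some x ∧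
          PySem.List.index? (PySem.Str.split₀ x) num = some t) := by
  induction xs using List.reverseRecOn with
  | nil => simp [pvLastHit]
  | append_singleton ys x ih =>
    rw [pvLastHit_concat]
    rw [List.reverse_append]
    simp only [List.reverse_singleton, List.singleton_append, List.find?_cons]
    cases hx : PySem.List.index? (PySem.Str.split₀ x) num with
    | some t =>
      simp only [Option.isSome_some]
      exact ⟨x, rfl, hx⟩
    | none =>
      simp only [Option.isSome_none]
      cases h : pvLastHit num ys with
      | none => rw [h] at ih; exact ih
      | some kt => obtain ⟨k, t⟩ := kt; rw [h] at ih; exact ih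

theorem pvZfill2_digit (t : Nat) (ht : t < 9) :
    pvZfill2 (PySem.Int.toStr ((t : Int) + 1)) = "0" ++ PySem.Int.toStr ((t : Int) + 1) := by
  interval_cases t <;> decide

-- ===== VERDICT (by name: the statement is the Claim_ definition above) =====
theorem pegar_linha_coluna_spec : Claim_equal_pegar_linha_coluna := by
  intro num dados _dom hpre
  unfold Spec_pegar_linha_coluna pegar_linha_coluna pegar_linha_coluna_alt
  rw [pvAltScan_eq_lastHit]
  have hfold := pvFoldA num dados 0 0 0
  have hfind := pvFind_lastHit num dados
  unfold Pre_pegar_linha_coluna at hpre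
  cases h : pvLastHit num dados with
  | none =>
    simp only [h] at hfold
    simp only [hfold]
    norm_num
    decide
  | some kt =>
    obtain ⟨k, t⟩ := kt
    simp only [h] at hfold hfind
    obtain ⟨x, hx, hidx⟩ := hfind
    rw [hx] at hpre
    simp only [Option.all_some, hidx, Option.getD_some, decide_eq_true_eq] at hpre
    simp only [hfold]
    have hj : (t : Int) + 1 < 10 := by omega
    simp only [if_pos hj]
    rw [pvZfill2_digit t hpre]
    have h0 : (0 : Int) + (k : Int) + 1 = (k : Int) + 1 := by ring
    rw [h0]
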